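-- pv_equiv track=rewrite | github.com/braedynl/CSE231-020-SS20 | Solutions/lab07_ans.py | get_industry_counts
-- ===== SOURCE A (Python) =====
-- from operator import itemgetter
--
-- INDUSTRIES = ['Agriculture', 'Business services', 'Construction', 'Leisure/hospitality', 'Manufacturing']
--
-- def get_industry_counts(L):
--     # This creates a list of lists, where each inner-list contains
--     # a string of the industry at index 0, and an associated count
--     # for that industry at index 1, alike:
--     # [ [{industry name}, {count}], [{industry name}, {count}], ... ]
--     industry_counts = []
--
--     for industry in INDUSTRIES:
--         industry_counts.append( [industry, 0] )
--
--     # [1:] to skip the US row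
--     for row in L[1:]:
--         industry = row[9]  # obtain the industry for the row we're on
--
--         # We search through the industry_counts list to find the count
--         # associated with whatever industry we have for this particular row.
--         for counter_list in industry_counts:
--             if counter_list[0] == industry:  # once we find it,
--                 counter_list[1] += 1         # we add one to the count
--
--     # we want to sort the industry_counts list by their frequency,
--     # (remember that they're at index 1 of each sub-list), so we
--     # supply the value '1' to the itemgetter() function. we also
--     # reverse it to make it sort in descending order (largest to smallest)
--     industry_counts.sort(key=itemgetter(1), reverse=True)
--
--     return industry_counts
-- ===== SOURCE B (Python) =====
-- INDUSTRIES = ['Agriculture', 'Business services', 'Construction', 'Leisure/hospitality', 'Manufacturing']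
--
-- def get_industry_counts(L):
--     # Extract the industry column once, then count each listed industry
--     # with list.count (one scan of the column per industry); no running
--     # counter structure is maintained.  Zero counts are kept, and the
--     # stable reverse sort preserves INDUSTRIES order on ties, like A.
--     column = [row[9] for row in L[1:]]
--     return sorted(([ind, column.count(ind)] for ind in INDUSTRIES),
--                   key=lambda pair: pair[1], reverse=True)
-- ===== Notes on version B (the rewrite author's own statement) =====
-- stated objective: idiomatic
-- what changed: B keeps no counter structure at all: it extracts the industry column in one pass, then counts each of the five industries with list.count over that column, and sorts with the sorted builtin, versus A's single pass that increments a mutable [name,count] list found by an inner scan.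
import Mathlib
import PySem

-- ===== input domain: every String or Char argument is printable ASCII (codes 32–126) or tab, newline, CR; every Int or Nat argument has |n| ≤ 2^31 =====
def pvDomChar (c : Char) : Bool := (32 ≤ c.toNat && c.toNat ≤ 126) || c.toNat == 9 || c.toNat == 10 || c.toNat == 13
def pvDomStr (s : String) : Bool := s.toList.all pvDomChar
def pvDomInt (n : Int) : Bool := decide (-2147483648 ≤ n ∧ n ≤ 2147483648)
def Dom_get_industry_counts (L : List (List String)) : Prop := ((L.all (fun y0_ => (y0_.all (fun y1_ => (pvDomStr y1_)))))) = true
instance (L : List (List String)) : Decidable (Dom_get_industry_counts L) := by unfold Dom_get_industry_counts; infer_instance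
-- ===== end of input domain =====

-- B keeps no counter structure: one pass extracts the industry column, then each
-- industry is counted over that column and the result sorted (idiomatic; same value).

-- ===== PORT A =====
def INDUSTRIES : List String :=
  ["Agriculture", "Business services", "Construction", "Leisure/hospitality", "Manufacturing"]

-- A: zero-initialised [industry, 0] list; for each row of L[1:] (= L.drop 1, exact),
-- scan the counters list incrementing the matching entry; then stable sort by count, reverse.
-- row[9] is ported with pyGet?; Pre_ guarantees it is some (Python raises IndexError otherwise).
def get_industry_counts (L : List (List String)) : List (String × Int) :=
  let init : List (String × Int) := INDUSTRIES.map (fun i => (i, (0 : Int)))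
  let counts := (L.drop 1).foldl
    (fun acc row =>
      let industry := (PySem.List.pyGet? row 9).getD ""
      acc.map (fun p => if p.1 == industry then (p.1, p.2 + 1) else p))
    init
  PySem.List.sorted counts (fun p => p.2) true

-- ===== PORT B =====
-- B: column = [row[9] for row in L[1:]]; then (ind, column.count(ind)) per industry;
-- sorted(..., key=pair[1], reverse=True).
def get_industry_counts_alt (L : List (List String)) : List (String × Int) :=
  let column := (L.drop 1).map (fun row => (PySem.List.pyGet? row 9).getD "")
  PySem.List.sorted
    (INDUSTRIES.map (fun ind => (ind, (PySem.List.count column ind : Int))))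
    (fun pair => pair.2) true

-- ===== PRECONDITION & SPEC =====
-- Pre_: every data row (L[1:]) has at least 10 fields; otherwise row[9] raises IndexError in A (and B).
def Pre_get_industry_counts (L : List (List String)) : Prop :=
  ∀ row ∈ L.drop 1, 10 ≤ row.length
instance (L : List (List String)) : Decidable (Pre_get_industry_counts L) := by
  unfold Pre_get_industry_counts; infer_instance

def pvWitness_get_industry_counts : List (List String) :=
  [["hdr"], ["a","b","c","d","e","f","g","h","i","Agriculture"],
   ["a","b","c","d","e","f","g","h","i","Construction"]]

def Spec_get_industry_counts (L : List (List String)) (out : List (String × Int)) : Prop := out = get_industry_counts_alt L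
instance (L : List (List String)) (out : List (String × Int)) : Decidable (Spec_get_industry_counts L out) := by unfold Spec_get_industry_counts; infer_instance

-- ===== CLAIM (what is proved, stated in full; the proofs are below) =====
def Claim_equal_get_industry_counts : Prop := ∀ (L : List (List String)), Dom_get_industry_counts L → Pre_get_industry_counts L → Spec_get_industry_counts L (get_industry_counts L)

-- ===== LEMMAS AND PROOFS =====

-- A's counters list after folding over the rows is INDUSTRIES paired with
-- (initial value + occurrence count of the industry in the extracted column).
theorem counts_fold_eq (rows : List (List String)) (c : String → Int) :
    rows.foldl
      (fun acc row =>
        let industry := (PySem.List.pyGet? row 9).getD ""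
        acc.map (fun p => if p.1 == industry then (p.1, p.2 + 1) else p))
      (INDUSTRIES.map (fun i => (i, c i)))
    = INDUSTRIES.map (fun i => (i,
        c i + (PySem.List.count (rows.map (fun row => (PySem.List.pyGet? row 9).getD "")) i : Int))) := by
  induction rows generalizing c with
  | nil => simp [PySem.List.count]
  | cons row rest ih =>
    simp only [List.foldl_cons, List.map_map]
    have hstep : (INDUSTRIES.map ((fun p : String × Int => if p.1 == (PySem.List.pyGet? row 9).getD "" then (p.1, p.2 + 1) else p) ∘ fun i => (i, c i)))
        = INDUSTRIES.map (fun i => (i, if i = (PySem.List.pyGet? row 9).getD "" then c i + 1 else c i)) := by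
      apply List.map_congr_left
      intro i _
      by_cases h : i = (PySem.List.pyGet? row 9).getD "" <;> simp [h]
    rw [hstep, ih]
    apply List.map_congr_left
    intro i _
    simp only [PySem.List.count_eq, List.map_cons, List.count_cons]
    by_cases h : i = (PySem.List.pyGet? row 9).getD ""
    · simp [h]; ring
    · simp [h, Ne.symm h]

-- ===== VERDICT (by name: the statement is the Claim_ definition above) =====
theorem get_industry_counts_spec : Claim_equal_get_industry_counts := by
  intro L _ _
  show get_industry_counts L = get_industry_counts_alt L
  simp only [get_industry_counts, get_industry_counts_alt]
  rw [counts_fold_eq]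
  simp
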